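-- pv_equiv track=rewrite | github.com/ispras/cv | scripts/mea/core.py | __compare_equal
-- ===== SOURCE A (Python) =====
-- def __compare_equal(edited_error_trace: dict, compared_error_trace: dict) -> int:
--     result = {}
--     for id_1, thread_1 in edited_error_trace.items():
--         for id_2, thread_2 in compared_error_trace.items():
--             if thread_1 == thread_2:
--                 if id_1 not in result:
--                     result[id_1] = []
--                 result[id_1].append(id_2)
--     return __convert_to_number_of_compared_threads(result)
--
-- def __convert_to_number_of_compared_threads(result: dict) -> int:
--     used_transitions = set()
--     max_number_of_threads = 0
--     while True:
--         used_ids_2 = set()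
--         number_of_threads = 0
--         for id_1, ids_2 in result.items():
--             for id_2 in ids_2:
--                 id_str = f"{id_1}_{id_2}"
--                 if id_2 not in used_ids_2 and id_str not in used_transitions:
--                     used_ids_2.add(id_2)
--                     used_transitions.add(id_str)
--                     number_of_threads += 1
--                     break
--         if number_of_threads > max_number_of_threads:
--             max_number_of_threads = number_of_threads
--
--         if number_of_threads == 0:
--             break
--     return max_number_of_threads
-- ===== SOURCE B (Python) =====
-- def __compare_equal(edited_error_trace: dict, compared_error_trace: dict) -> int:
--     # Count, per distinct thread body, how many compared threads carry it; then
--     # give each edited thread one unit of remaining capacity of its body.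
--     # Total matched = sum over bodies of min(#edited, #compared) -- computed in
--     # one pass over each trace instead of A's quadratic pairing + greedy rounds.
--     capacity = {}
--     for thread in compared_error_trace.values():
--         key = tuple(thread)
--         capacity[key] = capacity.get(key, 0) + 1
--     total = 0
--     for thread in edited_error_trace.values():
--         key = tuple(thread)
--         remaining = capacity.get(key, 0)
--         if remaining != 0:
--             capacity[key] = remaining - 1
--             total += 1
--     return total
-- ===== Notes on version B (the rewrite author's own statement) =====
-- stated objective: faster
-- what changed: Instead of materialising every equal (edited, compared) thread pair and replaying greedy matching rounds over them, B counts compared threads by body in one dict pass and gives each edited thread one unit of its body's remaining capacity, i.e. computes sum over thread bodies of min(#edited, #compared) directly; Pre_ only excludes association lists with duplicate keys, which do not represent Python dicts.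
import Mathlib
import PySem

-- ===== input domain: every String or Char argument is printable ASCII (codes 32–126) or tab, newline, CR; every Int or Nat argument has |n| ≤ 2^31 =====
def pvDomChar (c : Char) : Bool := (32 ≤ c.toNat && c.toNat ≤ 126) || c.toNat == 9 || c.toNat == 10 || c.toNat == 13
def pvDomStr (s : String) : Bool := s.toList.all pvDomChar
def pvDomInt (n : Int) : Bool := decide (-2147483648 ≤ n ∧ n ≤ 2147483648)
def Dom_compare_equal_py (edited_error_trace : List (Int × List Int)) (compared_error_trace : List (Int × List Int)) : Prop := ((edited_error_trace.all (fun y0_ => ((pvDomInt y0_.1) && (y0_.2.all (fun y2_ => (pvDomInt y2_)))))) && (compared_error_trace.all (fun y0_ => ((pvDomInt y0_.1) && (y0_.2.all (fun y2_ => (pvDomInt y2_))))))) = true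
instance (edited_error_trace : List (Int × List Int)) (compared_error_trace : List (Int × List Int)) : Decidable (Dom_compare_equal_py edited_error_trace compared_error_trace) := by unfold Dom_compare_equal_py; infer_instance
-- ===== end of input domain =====

-- B replaces A's quadratic pair materialisation + greedy matching rounds by one counting
-- pass over each trace (per thread body, min(#edited, #compared) threads match); measured faster.

-- ===== PORT A =====
-- f"{id_1}_{id_2}"
def pvEnc (i j : Int) : String := PySem.Int.toStr i ++ "_" ++ PySem.Int.toStr j

-- body of the inner 'for id_2, thread_2 in compared_error_trace.items():' loop
def pvBuildStep (p : Int × List Int) (res : PySem.Dict Int (List Int)) (q : Int × List Int) :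
    PySem.Dict Int (List Int) :=
  if p.2 == q.2 then
    (if res.contains p.1 then res else res.insert p.1 ([] : List Int)).modify p.1 [] (fun l => l ++ [q.1])
  else res

-- the nested loops building result
def pvBuildResult (edited compared : List (Int × List Int)) : PySem.Dict Int (List Int) :=
  edited.foldl (fun res p => compared.foldl (pvBuildStep p) res) PySem.Dict.empty

-- 'for id_2 in ids_2: … break' (stops after the first successful pick)
def pvInnerLoop (id1 : Int) (ids2 : List Int) (u2 : PySem.Set Int) (u : PySem.Set String) :
    PySem.Set Int × PySem.Set String × Int :=
  match ids2 with
  | [] => (u2, u, 0)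
  | j :: rest =>
    if !(PySem.Set.contains u2 j) && !(PySem.Set.contains u (pvEnc id1 j)) then
      (PySem.Set.add u2 j, PySem.Set.add u (pvEnc id1 j), 1)
    else pvInnerLoop id1 rest u2 u

-- one 'for id_1, ids_2 in result.items():' pass; state = (used_ids_2, used_transitions, number_of_threads)
def pvRoundStep (st : PySem.Set Int × PySem.Set String × Int) (p : Int × List Int) :
    PySem.Set Int × PySem.Set String × Int :=
  let r := pvInnerLoop p.1 p.2 st.1 st.2.1
  (r.1, r.2.1, st.2.2 + r.2.2)

def pvRound (items : List (Int × List Int)) (u : PySem.Set String) : PySem.Set String × Int :=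
  let st := items.foldl pvRoundStep (PySem.Set.empty, u, 0)
  (st.2.1, st.2.2)

-- the 'while True:' loop; the fuel argument only makes the same computation total:
-- every iteration except the last adds a new transition string, so (number of pairs)+1
-- iterations are enough, and the returned maximum is reached in the first round anyway
def pvConvertLoop (items : List (Int × List Int)) : Nat → PySem.Set String → Int → Int
  | 0, _, maxv => maxv
  | fuel+1, u, maxv =>
    let r := pvRound items u
    let maxv' := if r.2 > maxv then r.2 else maxv
    if r.2 = 0 then maxv' else pvConvertLoop items fuel r.1 maxv'

def compare_equal_py (edited_error_trace : List (Int × List Int)) (compared_error_trace : List (Int × List Int)) : Int :=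
  let items := (pvBuildResult edited_error_trace compared_error_trace).items
  pvConvertLoop items ((items.map (fun p => p.2.length)).sum + 1) PySem.Set.empty 0

-- ===== PORT B =====
-- 'remaining = capacity.get(key, 0); if remaining != 0: capacity[key] = remaining - 1; total += 1'
def pvBStep (st : PySem.Dict (List Int) Int × Int) (t : List Int) : PySem.Dict (List Int) Int × Int :=
  let remaining := st.1.getD t 0
  if remaining ≠ 0 then (st.1.insert t (remaining - 1), st.2 + 1) else st

def compare_equal_py_alt (edited_error_trace : List (Int × List Int)) (compared_error_trace : List (Int × List Int)) : Int :=
  let capacity := (compared_error_trace.map Prod.snd).foldl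
      (fun d t => d.insert t (d.getD t 0 + 1)) PySem.Dict.empty
  ((edited_error_trace.map Prod.snd).foldl pvBStep (capacity, 0)).2

-- ===== PRECONDITION & SPEC =====
-- Pre_ only excludes association lists with duplicate keys: those do not represent any
-- Python dict (A's two parameters are dicts), so A is never called on them.
def Pre_compare_equal_py (edited_error_trace : List (Int × List Int)) (compared_error_trace : List (Int × List Int)) : Prop :=
  (edited_error_trace.map Prod.fst).Nodup ∧ (compared_error_trace.map Prod.fst).Nodup
instance (edited_error_trace : List (Int × List Int)) (compared_error_trace : List (Int × List Int)) : Decidable (Pre_compare_equal_py edited_error_trace compared_error_trace) := by unfold Pre_compare_equal_py; infer_instance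

def pvWitness_compare_equal_py : (List (Int × List Int)) × (List (Int × List Int)) :=
  ([(1, [7, 8]), (2, [7, 8]), (3, [])], [(4, [7, 8]), (5, [9])])

def Spec_compare_equal_py (edited_error_trace : List (Int × List Int)) (compared_error_trace : List (Int × List Int)) (out : Int) : Prop := out = compare_equal_py_alt edited_error_trace compared_error_trace
instance (edited_error_trace : List (Int × List Int)) (compared_error_trace : List (Int × List Int)) (out : Int) : Decidable (Spec_compare_equal_py edited_error_trace compared_error_trace out) := by unfold Spec_compare_equal_py; infer_instance

-- ===== CLAIM (what is proved, stated in full; the proofs are below) =====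
def Claim_equal_compare_equal_py : Prop := ∀ (edited_error_trace : List (Int × List Int)) (compared_error_trace : List (Int × List Int)), Dom_compare_equal_py edited_error_trace compared_error_trace → Pre_compare_equal_py edited_error_trace compared_error_trace → Spec_compare_equal_py edited_error_trace compared_error_trace (compare_equal_py edited_error_trace compared_error_trace)

-- ===== LEMMAS AND PROOFS =====

-- ids of the compared threads whose body equals t, in order (what result[id_1] ends up as)
def pvMatches (t : List Int) (c : List (Int × List Int)) : List Int :=
  (c.filter (fun q => t == q.2)).map Prod.fst

def pvF (c : List (Int × List Int)) (p : Int × List Int) : Option (Int × List Int) :=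
  let l := pvMatches p.2 c
  if l.isEmpty then none else some (p.1, l)

-- remaining capacity of thread body t once the ids in u2 are taken
def pvCap (t : List Int) (c : List (Int × List Int)) (u2 : PySem.Set Int) : Nat :=
  (pvMatches t c).length - ((pvMatches t c).filter (fun j => PySem.Set.contains u2 j)).length

lemma pvDigitChar_ne (m : Nat) : Nat.digitChar m ≠ '_' ∧ Nat.digitChar m ≠ '-' := by
  by_cases h : m < 16
  · interval_cases m <;> exact ⟨by decide, by decide⟩
  · have h' : Nat.digitChar m = '*' := by
      unfold Nat.digitChar
      rw [if_neg (by omega), if_neg (by omega), if_neg (by omega), if_neg (by omega),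
         if_neg (by omega), if_neg (by omega), if_neg (by omega), if_neg (by omega),
         if_neg (by omega), if_neg (by omega), if_neg (by omega), if_neg (by omega),
         if_neg (by omega), if_neg (by omega), if_neg (by omega), if_neg (by omega)]
    rw [h']; exact ⟨by decide, by decide⟩

lemma pvToDigitsCore_eq : ∀ (f n : Nat) (acc : List Char), 0 < f → n < 10 ^ f →
    Nat.toDigitsCore 10 f n acc
      = (if n = 0 then ['0'] else ((Nat.digits 10 n).map Nat.digitChar).reverse) ++ acc := by
  intro f
  induction f with
  | zero => intro n acc h _; omega
  | succ f ih =>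
    intro n acc _ hn
    rw [show Nat.toDigitsCore 10 (f+1) n acc
        = if n / 10 = 0 then (n % 10).digitChar :: acc
          else Nat.toDigitsCore 10 f (n / 10) ((n % 10).digitChar :: acc) from rfl]
    by_cases h10 : n / 10 = 0
    · rw [if_pos h10]
      by_cases h0 : n = 0
      · subst h0; simp; decide
      · rw [if_neg h0, Nat.digits_def' (by norm_num : (1:ℕ) < 10) (Nat.pos_of_ne_zero h0), h10]
        simp
    · rw [if_neg h10]
      have hf : 0 < f := by
        rcases Nat.eq_zero_or_pos f with hf | hf
        · subst hf; simp at hn; omega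
        · exact hf
      have hdiv : n / 10 < 10 ^ f := by
        refine (Nat.div_lt_iff_lt_mul (by norm_num)).2 ?_
        rw [← pow_succ]; exact hn
      rw [if_neg (by omega : ¬ n = 0),
        Nat.digits_def' (by norm_num : (1:ℕ) < 10) (n := n) (Nat.pos_of_ne_zero (by omega)),
        ih (n / 10) _ hf hdiv, if_neg h10]
      simp

lemma pvToDigits_eq (n : Nat) :
    Nat.toDigits 10 n = if n = 0 then ['0'] else ((Nat.digits 10 n).map Nat.digitChar).reverse := by
  have h := pvToDigitsCore_eq (n + 1) n [] (Nat.succ_pos n)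
    (lt_of_lt_of_le (Nat.lt_pow_self (by norm_num)) (Nat.pow_le_pow_right (by norm_num) (Nat.le_succ n)))
  simpa [Nat.toDigits] using h

lemma pvToDigits_no_underscore (n : Nat) : ∀ ch ∈ Nat.toDigits 10 n, ch ≠ '_' ∧ ch ≠ '-' := by
  intro ch hch
  rw [pvToDigits_eq] at hch
  split at hch
  · simp at hch; subst hch; exact ⟨by decide, by decide⟩
  · simp only [List.mem_reverse, List.mem_map] at hch
    obtain ⟨d, _, rfl⟩ := hch
    exact pvDigitChar_ne d

lemma pvToDigits_inj {n m : Nat} (h : Nat.toDigits 10 n = Nat.toDigits 10 m) : n = m := by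
  have hval : ∀ d < 10, (Nat.digitChar d).toNat - 48 = d := by decide
  rw [pvToDigits_eq, pvToDigits_eq] at h
  have hzero : ∀ k : Nat, k ≠ 0 → ((Nat.digits 10 k).map Nat.digitChar).reverse = ['0'] → False := by
    intro k hk hmap
    have h1 : (Nat.digits 10 k).map Nat.digitChar = ['0'] := by
      have := congrArg List.reverse hmap; simpa using this
    rcases hd : Nat.digits 10 k with _ | ⟨d, ds⟩
    · rw [hd] at h1; simp at h1
    · rw [hd] at h1
      rcases ds with _ | ⟨d2, ds2⟩
      · simp at h1
        have hd10 : d < 10 := Nat.digits_lt_base (by norm_num) (by rw [hd]; exact List.mem_cons_self)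
        have : d = 0 := by have := hval d hd10; rw [h1] at this; simpa using this.symm
        subst this
        have := Nat.ofDigits_digits 10 k
        rw [hd] at this; simp [Nat.ofDigits] at this; omega
      · simp at h1
  by_cases hn : n = 0 <;> by_cases hm : m = 0
  · omega
  · rw [if_pos hn, if_neg hm] at h; exact absurd h.symm (fun hh => (hzero m hm hh).elim)
  · rw [if_neg hn, if_pos hm] at h; exact absurd h (fun hh => (hzero n hn hh).elim)
  · rw [if_neg hn, if_neg hm] at h
    have h2 : (Nat.digits 10 n).map Nat.digitChar = (Nat.digits 10 m).map Nat.digitChar :=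
      List.reverse_injective h
    have h3 : Nat.digits 10 n = Nat.digits 10 m := by
      have e : ∀ k : Nat, ((Nat.digits 10 k).map Nat.digitChar).map (fun ch => ch.toNat - 48)
          = Nat.digits 10 k := by
        intro k
        rw [List.map_map]
        have : ∀ d ∈ Nat.digits 10 k, ((fun ch => ch.toNat - 48) ∘ Nat.digitChar) d = d := by
          intro d hd; exact hval d (Nat.digits_lt_base (by norm_num) hd)
        rw [List.map_congr_left this]; simp
      rw [← e n, ← e m, h2]
    rw [← Nat.ofDigits_digits 10 n, ← Nat.ofDigits_digits 10 m, h3]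

lemma pvToChars_eq (n : Int) : PySem.Int.toChars n
    = if n < 0 then '-' :: Nat.toDigits 10 n.natAbs else Nat.toDigits 10 n.toNat := rfl

lemma pvToChars_no_underscore (n : Int) : ∀ ch ∈ PySem.Int.toChars n, ch ≠ '_' := by
  intro ch hch
  rw [pvToChars_eq] at hch
  split at hch
  · rcases List.mem_cons.1 hch with rfl | hch
    · decide
    · exact (pvToDigits_no_underscore _ ch hch).1
  · exact (pvToDigits_no_underscore _ ch hch).1

lemma pvToChars_inj {n m : Int} (h : PySem.Int.toChars n = PySem.Int.toChars m) : n = m := by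
  rw [pvToChars_eq, pvToChars_eq] at h
  by_cases hn : n < 0 <;> by_cases hm : m < 0
  · rw [if_pos hn, if_pos hm] at h
    have := pvToDigits_inj (List.tail_eq_of_cons_eq h)
    omega
  · rw [if_pos hn, if_neg hm] at h
    have : '-' ∈ Nat.toDigits 10 m.toNat := by rw [← h]; exact List.mem_cons_self
    exact absurd rfl (pvToDigits_no_underscore _ '-' this).2
  · rw [if_neg hn, if_pos hm] at h
    have : '-' ∈ Nat.toDigits 10 n.toNat := by rw [h]; exact List.mem_cons_self
    exact absurd rfl (pvToDigits_no_underscore _ '-' this).2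
  · rw [if_neg hn, if_neg hm] at h
    have := pvToDigits_inj h
    omega

lemma pvSplit_underscore : ∀ (a : List Char) {b : List Char} (a' : List Char) {b' : List Char},
    '_' ∉ a → '_' ∉ a' → a ++ '_' :: b = a' ++ '_' :: b' → a = a' ∧ b = b' := by
  intro a
  induction a with
  | nil =>
      intro b a' b' _ ha' h
      cases a' with
      | nil => simpa using h
      | cons y ys =>
          simp at h
          exact absurd (by rw [h.1]; exact List.mem_cons_self) ha'
  | cons x xs ih =>
      intro b a' b' ha ha' h
      cases a' with
      | nil =>
          simp at h
          exact absurd (by rw [← h.1]; exact List.mem_cons_self) ha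
      | cons y ys =>
          simp only [List.cons_append, List.cons.injEq] at h
          obtain ⟨rfl, h2⟩ := h
          obtain ⟨h3, h4⟩ := ih ys (by intro hx; exact ha (List.mem_cons_of_mem _ hx))
            (by intro hy; exact ha' (List.mem_cons_of_mem _ hy)) h2
          exact ⟨by rw [h3], h4⟩
lemma pvDictStep_appended (p : Int × List Int) (q : Int × List Int)
    (itms : List (Int × List Int)) (acc : List Int)
    (hfresh : ∀ r ∈ itms, (r.1 == p.1) = false) (hm : (p.2 == q.2) = true) :
    pvBuildStep p (PySem.Dict.mk (itms ++ [(p.1, acc)])) q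
      = PySem.Dict.mk (itms ++ [(p.1, acc ++ [q.1])]) := by
  have hcont : (PySem.Dict.mk (itms ++ [(p.1, acc)])).contains p.1 = true := by
    simp [PySem.Dict.contains]
  have hget : (PySem.Dict.mk (itms ++ [(p.1, acc)])).getD p.1 [] = acc := by
    simp only [PySem.Dict.getD, PySem.Dict.get?]
    rw [List.find?_append]
    have h1 : (itms.find? (fun r => r.1 == p.1)) = none := by
      rw [List.find?_eq_none]; intro r hr; simp [hfresh r hr]
    simp [h1]
  simp only [pvBuildStep]
  rw [if_pos hm, if_pos hcont]
  simp only [PySem.Dict.modify]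
  rw [hget]
  simp only [PySem.Dict.insert]
  rw [if_pos hcont]
  congr 1
  rw [List.map_append]
  congr 1
  · have hid : ∀ r ∈ itms,
        (fun p_1 => if (p_1.1 == p.1) = true then (p.1, acc ++ [q.1]) else p_1) r = r := by
      intro r hr; simp [hfresh r hr]
    rw [List.map_congr_left hid]; simp
  · simp

lemma pvInner_phase2 (p : Int × List Int) :
    ∀ (c : List (Int × List Int)) (itms : List (Int × List Int)) (acc : List Int),
    (∀ r ∈ itms, (r.1 == p.1) = false) →
    c.foldl (pvBuildStep p) (PySem.Dict.mk (itms ++ [(p.1, acc)]))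
      = PySem.Dict.mk (itms ++ [(p.1, acc ++ pvMatches p.2 c)]) := by
  intro c
  induction c with
  | nil => intro itms acc h; simp [pvMatches]
  | cons q rest ih =>
      intro itms acc h
      rw [List.foldl_cons]
      by_cases hm : (p.2 == q.2) = true
      · rw [pvDictStep_appended p q itms acc h hm, ih itms _ h]
        simp [pvMatches, hm]
      · have : pvBuildStep p (PySem.Dict.mk (itms ++ [(p.1, acc)])) q
            = PySem.Dict.mk (itms ++ [(p.1, acc)]) := by
          simp only [pvBuildStep]
          rw [if_neg hm]
        rw [this, ih itms acc h]
        have hm' : (p.2 == q.2) = false := by simpa using hm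
        simp [pvMatches, hm']

lemma pvInner_phase1 (p : Int × List Int) :
    ∀ (c : List (Int × List Int)) (d : PySem.Dict Int (List Int)),
    d.contains p.1 = false →
    c.foldl (pvBuildStep p) d
      = if (pvMatches p.2 c).isEmpty then d else PySem.Dict.mk (d.items ++ [(p.1, pvMatches p.2 c)]) := by
  intro c
  induction c with
  | nil => intro d h; simp [pvMatches]
  | cons q rest ih =>
      intro d h
      have hfresh : ∀ r ∈ d.items, (r.1 == p.1) = false := by
        intro r hr
        by_contra hb
        simp only [Bool.not_eq_false] at hb
        have : d.contains p.1 = true := by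
          simp only [PySem.Dict.contains]
          exact List.any_eq_true.2 ⟨r, hr, hb⟩
        rw [this] at h; exact Bool.noConfusion h
      rw [List.foldl_cons]
      by_cases hm : (p.2 == q.2) = true
      · have hd1 : pvBuildStep p d q = PySem.Dict.mk (d.items ++ [(p.1, [q.1])]) := by
          simp only [pvBuildStep]
          rw [if_pos hm, if_neg (by rw [h]; exact Bool.false_ne_true)]
          simp only [PySem.Dict.insert]
          rw [if_neg (by rw [h]; exact Bool.false_ne_true)]
          simp only [PySem.Dict.modify]
          have hget : (PySem.Dict.mk (d.items ++ [(p.1, ([] : List Int))])).getD p.1 [] = [] := by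
            simp only [PySem.Dict.getD, PySem.Dict.get?]
            rw [List.find?_append]
            have h1 : (d.items.find? (fun r => r.1 == p.1)) = none := by
              rw [List.find?_eq_none]; intro r hr; simp [hfresh r hr]
            simp [h1]
          have hcont : (PySem.Dict.mk (d.items ++ [(p.1, ([] : List Int))])).contains p.1 = true := by
            simp [PySem.Dict.contains]
          rw [hget]
          simp only [PySem.Dict.insert]
          rw [if_pos hcont]
          congr 1
          rw [List.map_append]
          congr 1
          · have hid : ∀ r ∈ d.items,
                (fun p_1 => if (p_1.1 == p.1) = true then (p.1, ([] : List Int) ++ [q.1]) else p_1) r = r := by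
              intro r hr; simp [hfresh r hr]
            rw [List.map_congr_left hid]; simp
          · simp
        rw [hd1, pvInner_phase2 p rest d.items [q.1] hfresh]
        have : pvMatches p.2 (q :: rest) = q.1 :: pvMatches p.2 rest := by
          simp [pvMatches, hm]
        rw [this]
        simp
      · have hm' : (p.2 == q.2) = false := by simpa using hm
        have : pvBuildStep p d q = d := by simp only [pvBuildStep]; rw [if_neg hm]
        rw [this, ih d h]
        have hfc : List.filter (fun r => p.2 == r.2) (q :: rest) = List.filter (fun r => p.2 == r.2) rest := by
          rw [List.filter_cons_of_neg]; simpa using hm'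
        simp only [pvMatches, hfc]

lemma pvBuild_aux (c : List (Int × List Int)) :
    ∀ (e : List (Int × List Int)) (d : PySem.Dict Int (List Int)),
    (e.map Prod.fst).Nodup →
    (∀ i ∈ e.map Prod.fst, d.contains i = false) →
    (e.foldl (fun res p => c.foldl (pvBuildStep p) res) d).items = d.items ++ e.filterMap (pvF c) := by
  intro e
  induction e with
  | nil => intro d _ _; simp
  | cons p rest ih =>
      intro d hnd hfresh
      rw [List.foldl_cons, pvInner_phase1 p c d (hfresh p.1 (by simp))]
      by_cases hemp : (pvMatches p.2 c).isEmpty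
      · rw [if_pos hemp]
        rw [ih d (by simpa using hnd.of_cons) (fun i hi => hfresh i (by simp [hi]))]
        have : pvF c p = none := by simp only [pvF]; rw [if_pos hemp]
        simp [this]
      · rw [if_neg hemp]
        have hne : p.1 ∉ rest.map Prod.fst := by
          simp only [List.map_cons, List.nodup_cons] at hnd; exact hnd.1
        rw [ih (PySem.Dict.mk (d.items ++ [(p.1, pvMatches p.2 c)]))
            (by simpa using hnd.of_cons) ?_]
        · have : pvF c p = some (p.1, pvMatches p.2 c) := by simp only [pvF]; rw [if_neg hemp]
          simp [this]
        · intro i hi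
          have hip : i ≠ p.1 := by rintro rfl; exact hne hi
          simp only [PySem.Dict.contains] at *
          rw [List.any_append]
          have h1 : d.items.any (fun r => r.1 == i) = false := by
            have := hfresh i (by simp [hi])
            simpa [PySem.Dict.contains] using this
          simp [h1, hip.symm]

lemma pvBuildResult_items (e c : List (Int × List Int)) (he : (e.map Prod.fst).Nodup) :
    (pvBuildResult e c).items = e.filterMap (pvF c) := by
  have := pvBuild_aux c e PySem.Dict.empty he (by intro i _; rfl)
  simpa [pvBuildResult, PySem.Dict.empty] using this

-- ==== small generic helpers ====

lemma pvContains_add {α : Type} [BEq α] [LawfulBEq α] (s : PySem.Set α) (j x : α) :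
    PySem.Set.contains (PySem.Set.add s j) x = (PySem.Set.contains s x || (x == j)) := by
  rw [Bool.eq_iff_iff]
  simp only [PySem.Set.add]
  split
  · next h =>
      simp only [PySem.Set.contains, List.contains_iff_mem, Bool.or_eq_true, beq_iff_eq] at *
      constructor
      · exact fun hh => Or.inl hh
      · rintro (hh | rfl)
        · exact hh
        · exact h
  · simp only [PySem.Set.contains, List.contains_iff_mem, Bool.or_eq_true, beq_iff_eq,
      List.mem_append, List.mem_singleton]

lemma pvFind_congr {α : Type} (p q : α → Bool) :
    ∀ (l : List α), (∀ x ∈ l, p x = q x) → l.find? p = l.find? q := by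
  intro l
  induction l with
  | nil => intro _; rfl
  | cons x xs ih =>
      intro h
      rw [List.find?_cons, List.find?_cons, h x (by simp), ih (fun y hy => h y (by simp [hy]))]

lemma pvFindTake {α : Type} (p : α → Bool) :
    ∀ (l : List α), l.Nodup → ∀ (k : Nat), l.filter p = l.take k →
    l.find? (fun x => !p x) = (l.drop k).head? := by
  intro l
  induction l with
  | nil => intro _ k _; simp
  | cons x xs ih =>
      intro hnd k h
      cases k with
      | zero =>
          simp only [List.take_zero] at h
          have h1 : p x = false ∧ xs.filter p = [] := by
            have := List.filter_eq_nil_iff.1 h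
            exact ⟨by simpa using this x (by simp), List.filter_eq_nil_iff.2 (fun a ha => this a (by simp [ha]))⟩
          rw [List.find?_cons]
          simp [h1.1]
      | succ k =>
          rw [List.take_succ_cons] at h
          have hpx : p x = true := by
            by_contra hb
            simp only [Bool.not_eq_true] at hb
            rw [List.filter_cons_of_neg (by simp [hb])] at h
            have : x ∈ xs.filter p := by rw [h]; exact List.mem_cons_self
            have := List.mem_of_mem_filter this
            simp only [List.nodup_cons] at hnd
            exact hnd.1 this
          rw [List.filter_cons_of_pos hpx] at h
          rw [List.find?_cons]
          simp only [hpx, Bool.not_true]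
          rw [List.drop_succ_cons]
          exact ih (by simp only [List.nodup_cons] at hnd; exact hnd.2) k (by
            injection h)

lemma pvFilterTakeSucc {α : Type} [BEq α] [LawfulBEq α] (p : α → Bool) :
    ∀ (l : List α), l.Nodup → ∀ (k : Nat) (j : α), l.filter p = l.take k →
    (l.drop k).head? = some j →
    l.filter (fun x => p x || (x == j)) = l.take (k + 1) := by
  intro l
  induction l with
  | nil => intro _ k j _ hj; simp at hj
  | cons x xs ih =>
      intro hnd k j h hj
      simp only [List.nodup_cons] at hnd
      cases k with
      | zero =>
          simp only [List.drop_zero, List.head?_cons, Option.some.injEq] at hj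
          subst hj
          simp only [List.take_zero] at h
          have hall := List.filter_eq_nil_iff.1 h
          rw [List.filter_cons_of_pos (by simp)]
          have : xs.filter (fun y => p y || (y == x)) = [] := by
            rw [List.filter_eq_nil_iff]
            intro a ha
            have h1 : p a = false := by
              have := hall a (by simp [ha]); simpa using this
            have h2 : (a == x) = false := by
              have : a ≠ x := by rintro rfl; exact hnd.1 ha
              simpa using this
            simp [h1, h2]
          rw [this]
          simp
      | succ k =>
          have hpx : p x = true := by
            by_contra hb
            simp only [Bool.not_eq_true] at hb
            rw [List.take_succ_cons, List.filter_cons_of_neg (by simp [hb])] at h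
            have : x ∈ xs.filter p := by rw [h]; exact List.mem_cons_self
            exact hnd.1 (List.mem_of_mem_filter this)
          rw [List.take_succ_cons, List.filter_cons_of_pos hpx] at h
          rw [List.drop_succ_cons] at hj
          rw [List.filter_cons_of_pos (by simp [hpx]), List.take_succ_cons]
          congr 1
          exact ih hnd.2 k j (by injection h) hj

lemma pvFilterOrNotMem {α : Type} [BEq α] [LawfulBEq α] (p : α → Bool) (l : List α) (j : α)
    (hj : j ∉ l) : l.filter (fun x => p x || (x == j)) = l.filter p := by
  apply List.filter_congr
  intro x hx
  have : (x == j) = false := by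
    have : x ≠ j := by rintro rfl; exact hj hx
    simpa using this
  simp [this]

lemma pvCountP_split {α : Type} (p q : α → Bool) (himp : ∀ x, p x = true → q x = true) :
    ∀ (l : List α), l.countP q = l.countP p + l.countP (fun x => q x && !p x) := by
  intro l
  induction l with
  | nil => simp
  | cons x xs ih =>
      simp only [List.countP_cons, ih]
      by_cases hp : p x = true
      · simp [hp, himp x hp]; omega
      · simp only [Bool.not_eq_true] at hp
        by_cases hq : q x = true
        · simp [hp, hq]; omega
        · simp only [Bool.not_eq_true] at hq
          simp [hp, hq]
lemma pvEnc_inj {i j i' j' : Int} (h : pvEnc i j = pvEnc i' j') : i = i' ∧ j = j' := by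
  have hl := congrArg String.toList h
  simp only [pvEnc, String.toList_append, PySem.Int.toList_toStr] at hl
  rw [show "_".toList = ['_'] from rfl] at hl
  rw [List.append_assoc, List.append_assoc, List.singleton_append, List.singleton_append] at hl
  obtain ⟨h1, h2⟩ := pvSplit_underscore _ _
    (fun hm => (pvToChars_no_underscore i '_' hm) rfl)
    (fun hm => (pvToChars_no_underscore i' '_' hm) rfl) hl
  exact ⟨pvToChars_inj h1, pvToChars_inj h2⟩

lemma pvMatches_nodup (c : List (Int × List Int)) (hc : (c.map Prod.fst).Nodup) (t : List Int) :
    (pvMatches t c).Nodup :=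
  List.Nodup.sublist (List.Sublist.map Prod.fst List.filter_sublist) hc

lemma pvMatches_disjoint (c : List (Int × List Int)) (hc : (c.map Prod.fst).Nodup)
    {t t' : List Int} (hne : t ≠ t') {j : Int}
    (h1 : j ∈ pvMatches t c) (h2 : j ∈ pvMatches t' c) : False := by
  simp only [pvMatches, List.mem_map] at h1 h2
  obtain ⟨q, hq, rfl⟩ := h1
  obtain ⟨q', hq', he⟩ := h2
  rw [List.mem_filter] at hq hq'
  have heq : q' = q := List.inj_on_of_nodup_map hc hq'.1 hq.1 he
  apply hne
  rw [eq_of_beq hq.2, eq_of_beq hq'.2, heq]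

lemma pvMatches_length (c : List (Int × List Int)) (t : List Int) :
    (pvMatches t c).length = (c.map Prod.snd).count t := by
  simp only [pvMatches, List.length_map]
  rw [← List.countP_eq_length_filter, List.count_eq_countP, List.countP_map]
  apply List.countP_congr
  intro q _
  simp only [Function.comp_apply, beq_iff_eq]
  exact eq_comm

lemma pvFilter_contains_empty (l : List Int) :
    l.filter (fun j => PySem.Set.contains PySem.Set.empty j) = [] :=
  List.filter_eq_nil_iff.2 (fun a _ => by simp [PySem.Set.contains, PySem.Set.empty])

lemma pvCap_empty (c : List (Int × List Int)) (t : List Int) :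
    pvCap t c PySem.Set.empty = (pvMatches t c).length := by
  unfold pvCap
  rw [pvFilter_contains_empty]
  simp only [List.length_nil]
  omega

lemma pvFilter_contains_add (l : List Int) (u2 : PySem.Set Int) (j : Int) :
    l.filter (fun x => PySem.Set.contains (PySem.Set.add u2 j) x)
      = l.filter (fun x => PySem.Set.contains u2 x || (x == j)) :=
  List.filter_congr (fun x _ => pvContains_add u2 j x)

lemma pvSum_split (T : Finset (List Int)) (t0 : List Int) (ht : t0 ∈ T) (F G : List Int → ℕ)
    (hoff : ∀ t ∈ T, t ≠ t0 → F t = G t) :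
    (∑ t ∈ T, F t) = F t0 + ∑ t ∈ T.erase t0, G t := by
  rw [← Finset.add_sum_erase T F ht]
  congr 1
  exact Finset.sum_congr rfl (fun t htm => hoff t (Finset.mem_of_mem_erase htm) (Finset.ne_of_mem_erase htm))

lemma pvCount_cons_ne {t b : List Int} (l : List (List Int)) (h : t ≠ b) :
    (b :: l).count t = l.count t := by
  rw [List.count_cons]; simp [Ne.symm h]

lemma pvCount_cons_self {b : List Int} (l : List (List Int)) :
    (b :: l).count b = l.count b + 1 := by
  rw [List.count_cons]; simp

lemma pvInnerLoop_eq_find (id1 : Int) (l : List Int) (u2 : PySem.Set Int) (u : PySem.Set String) :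
    pvInnerLoop id1 l u2 u
      = match l.find? (fun j => !(PySem.Set.contains u2 j) && !(PySem.Set.contains u (pvEnc id1 j))) with
        | some j => (PySem.Set.add u2 j, PySem.Set.add u (pvEnc id1 j), 1)
        | none => (u2, u, 0) := by
  induction l with
  | nil => rfl
  | cons j rest ih =>
      rw [List.find?_cons]
      cases hc : (!(PySem.Set.contains u2 j) && !(PySem.Set.contains u (pvEnc id1 j))) with
      | true => simp only [pvInnerLoop]; rw [if_pos hc]
      | false => simp only [pvInnerLoop]; rw [if_neg (by rw [hc]; exact Bool.false_ne_true)]; exact ih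

-- ---- exact first round: with no transitions recorded for the ids still to be processed,
-- each entry takes the next unused id of its body's match list ----
lemma pvRound_exact (c : List (Int × List Int)) (hc : (c.map Prod.fst).Nodup) (T : Finset (List Int)) :
    ∀ (e₂ : List (Int × List Int)) (u2 : PySem.Set Int) (u : PySem.Set String) (n : Int),
    (∀ t ∈ e₂.map Prod.snd, t ∈ T) →
    (e₂.map Prod.fst).Nodup →
    (∀ t, ∃ k, (pvMatches t c).filter (fun j => PySem.Set.contains u2 j) = (pvMatches t c).take k) →
    (∀ s ∈ u, ∃ i j, s = pvEnc i j ∧ i ∉ e₂.map Prod.fst) →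
    ((e₂.filterMap (pvF c)).foldl pvRoundStep (u2, u, n)).2.2
      = n + ((∑ t ∈ T, min ((e₂.map Prod.snd).count t) (pvCap t c u2) : ℕ) : Int) := by
  intro e₂
  induction e₂ with
  | nil => intro u2 u n _ _ _ _; simp
  | cons p e₂ ih =>
    intro u2 u n hT hnd hfil hu
    have ht0 : p.2 ∈ T := hT p.2 (by simp)
    have hndt : (e₂.map Prod.fst).Nodup := by
      simp only [List.map_cons, List.nodup_cons] at hnd; exact hnd.2
    have hp1 : p.1 ∉ e₂.map Prod.fst := by
      simp only [List.map_cons, List.nodup_cons] at hnd; exact hnd.1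
    have hTt : ∀ t ∈ e₂.map Prod.snd, t ∈ T := fun t ht => hT t (by simp [ht])
    by_cases hemp : (pvMatches p.2 c).isEmpty
    · have hnil : pvMatches p.2 c = [] := List.isEmpty_iff.1 hemp
      have hcap0 : pvCap p.2 c u2 = 0 := by simp [pvCap, hnil]
      rw [List.filterMap_cons_none (by simp [pvF, hemp])]
      rw [ih u2 u n hTt hndt hfil (fun s hs => by
        obtain ⟨i, j, he, hi⟩ := hu s hs
        exact ⟨i, j, he, fun hmem => hi (by simp [hmem])⟩)]
      congr 1
      rw [pvSum_split T p.2 ht0 _ (fun t => min ((e₂.map Prod.snd).count t) (pvCap t c u2)) ?off1,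
          pvSum_split T p.2 ht0 (fun t => min (((p :: e₂).map Prod.snd).count t) (pvCap t c u2))
            (fun t => min ((e₂.map Prod.snd).count t) (pvCap t c u2)) ?off2]
      · rw [hcap0]; simp
      case off1 => intro t _ _; rfl
      case off2 =>
        intro t _ hne
        simp only [List.map_cons]
        rw [pvCount_cons_ne _ hne]
    · rw [List.filterMap_cons_some (by simp [pvF, hemp] : pvF c p = some (p.1, pvMatches p.2 c))]
      rw [List.foldl_cons]
      have hucf : ∀ x ∈ pvMatches p.2 c, PySem.Set.contains u (pvEnc p.1 x) = false := by
        intro x hx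
        by_contra hb
        simp only [Bool.not_eq_false] at hb
        have hmem : pvEnc p.1 x ∈ u := by
          simpa [PySem.Set.contains, List.contains_iff_mem] using hb
        obtain ⟨i, j, he, hi⟩ := hu _ hmem
        obtain ⟨h1, _⟩ := pvEnc_inj he.symm
        exact hi (by simp [← h1])
      obtain ⟨k, hk⟩ := hfil p.2
      have hmnd : (pvMatches p.2 c).Nodup := pvMatches_nodup c hc p.2
      have hstep : pvRoundStep (u2, u, n) (p.1, pvMatches p.2 c)
          = match ((pvMatches p.2 c).drop k).head? with
            | some j => (PySem.Set.add u2 j, PySem.Set.add u (pvEnc p.1 j), n + 1)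
            | none => (u2, u, n) := by
        simp only [pvRoundStep, pvInnerLoop_eq_find]
        rw [pvFind_congr _ (fun x => !(PySem.Set.contains u2 x)) _ (by
          intro x hx; rw [hucf x hx]; simp)]
        rw [pvFindTake _ _ hmnd k hk]
        cases ((pvMatches p.2 c).drop k).head? <;> simp
      rw [hstep]
      cases hdk : ((pvMatches p.2 c).drop k).head? with
      | none =>
          have hlen : (pvMatches p.2 c).length ≤ k := by
            by_contra hb
            rw [not_le] at hb
            rw [List.head?_eq_none_iff, List.drop_eq_nil_iff] at hdk
            omega
          have hcap0 : pvCap p.2 c u2 = 0 := by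
            have htk : (pvMatches p.2 c).take k = pvMatches p.2 c := List.take_of_length_le hlen
            simp only [pvCap, hk, htk]
            omega
          rw [ih u2 u n hTt hndt hfil (fun s hs => by
            obtain ⟨i, j, he, hi⟩ := hu s hs
            exact ⟨i, j, he, fun hmem => hi (by simp [hmem])⟩)]
          congr 1
          rw [pvSum_split T p.2 ht0 _ (fun t => min ((e₂.map Prod.snd).count t) (pvCap t c u2)) ?off3,
              pvSum_split T p.2 ht0 (fun t => min (((p :: e₂).map Prod.snd).count t) (pvCap t c u2))
                (fun t => min ((e₂.map Prod.snd).count t) (pvCap t c u2)) ?off4]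
          · rw [hcap0]; simp
          case off3 => intro t _ _; rfl
          case off4 =>
            intro t _ hne
            simp only [List.map_cons]
            rw [pvCount_cons_ne _ hne]
      | some j =>
          have hlt : k < (pvMatches p.2 c).length := by
            by_contra hb
            rw [not_lt] at hb
            rw [List.drop_eq_nil_of_le hb] at hdk
            simp at hdk
          have hjmem : j ∈ pvMatches p.2 c := by
            have : j ∈ (pvMatches p.2 c).drop k := by
              obtain ⟨tl, htl⟩ := List.head?_eq_some_iff.1 hdk
              rw [htl]; exact List.mem_cons_self
            exact List.mem_of_mem_drop this
          -- new invariant for the filter/take form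
          have hfil' : ∀ t, ∃ k', (pvMatches t c).filter
              (fun x => PySem.Set.contains (PySem.Set.add u2 j) x) = (pvMatches t c).take k' := by
            intro t
            rw [pvFilter_contains_add]
            by_cases hteq : t = p.2
            · subst hteq
              exact ⟨k + 1, pvFilterTakeSucc _ _ hmnd k j hk hdk⟩
            · obtain ⟨k', hk'⟩ := hfil t
              refine ⟨k', ?_⟩
              rw [pvFilterOrNotMem _ _ _ (fun hmem => pvMatches_disjoint c hc hteq hmem hjmem)]
              exact hk'
          have hu' : ∀ s ∈ PySem.Set.add u (pvEnc p.1 j), ∃ i j', s = pvEnc i j' ∧ i ∉ e₂.map Prod.fst := by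
            intro s hs
            rcases (PySem.Set.mem_add _ _ _).1 hs with hs | rfl
            · obtain ⟨i, j', he, hi⟩ := hu s hs
              exact ⟨i, j', he, fun hmem => hi (by simp [hmem])⟩
            · exact ⟨p.1, j, rfl, hp1⟩
          rw [ih (PySem.Set.add u2 j) (PySem.Set.add u (pvEnc p.1 j)) (n + 1) hTt hndt hfil' hu']
          -- arithmetic on the sums
          have hkk : ((pvMatches p.2 c).filter (fun x => PySem.Set.contains u2 x)).length = k := by
            rw [hk, List.length_take]; omega
          have hkk' : ((pvMatches p.2 c).filter
              (fun x => PySem.Set.contains (PySem.Set.add u2 j) x)).length = k + 1 := by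
            rw [pvFilter_contains_add, pvFilterTakeSucc _ _ hmnd k j hk hdk, List.length_take]
            omega
          have hcap_new : pvCap p.2 c (PySem.Set.add u2 j) = (pvMatches p.2 c).length - (k + 1) := by
            simp only [pvCap, hkk']
          have hcap_old : pvCap p.2 c u2 = (pvMatches p.2 c).length - k := by
            simp only [pvCap, hkk]
          have hcap_other : ∀ t, t ≠ p.2 → pvCap t c (PySem.Set.add u2 j) = pvCap t c u2 := by
            intro t hne
            simp only [pvCap]
            rw [pvFilter_contains_add, pvFilterOrNotMem _ _ _
              (fun hmem => pvMatches_disjoint c hc hne hmem hjmem)]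
          rw [pvSum_split T p.2 ht0 _
              (fun t => min ((e₂.map Prod.snd).count t) (pvCap t c u2)) ?off5,
             pvSum_split T p.2 ht0 (fun t => min (((p :: e₂).map Prod.snd).count t) (pvCap t c u2))
              (fun t => min ((e₂.map Prod.snd).count t) (pvCap t c u2)) ?off6]
          · rw [hcap_new, hcap_old]
            simp only [List.map_cons, pvCount_cons_self]
            push_cast
            omega
          case off5 =>
            intro t _ hne
            rw [hcap_other t hne]
          case off6 =>
            intro t _ hne
            simp only [List.map_cons]
            rw [pvCount_cons_ne _ hne]
-- ---- any round is bounded by the same per-body minima ----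
lemma pvRound_le (c : List (Int × List Int)) (hc : (c.map Prod.fst).Nodup) (T : Finset (List Int)) :
    ∀ (e₂ : List (Int × List Int)) (u2 : PySem.Set Int) (u : PySem.Set String) (n : Int),
    (∀ t ∈ e₂.map Prod.snd, t ∈ T) →
    ((e₂.filterMap (pvF c)).foldl pvRoundStep (u2, u, n)).2.2
      ≤ n + ((∑ t ∈ T, min ((e₂.map Prod.snd).count t) (pvCap t c u2) : ℕ) : Int) := by
  intro e₂
  induction e₂ with
  | nil => intro u2 u n _; simp
  | cons p e₂ ih =>
    intro u2 u n hT
    have ht0 : p.2 ∈ T := hT p.2 (by simp)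
    have hTt : ∀ t ∈ e₂.map Prod.snd, t ∈ T := fun t ht => hT t (by simp [ht])
    have hsum_mono : (∑ t ∈ T, min ((e₂.map Prod.snd).count t) (pvCap t c u2))
        ≤ ∑ t ∈ T, min (((p :: e₂).map Prod.snd).count t) (pvCap t c u2) := by
      apply Finset.sum_le_sum
      intro t _
      have : (e₂.map Prod.snd).count t ≤ ((p :: e₂).map Prod.snd).count t := by
        simp only [List.map_cons, List.count_cons]; omega
      omega
    by_cases hemp : (pvMatches p.2 c).isEmpty
    · rw [List.filterMap_cons_none (by simp [pvF, hemp])]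
      calc ((e₂.filterMap (pvF c)).foldl pvRoundStep (u2, u, n)).2.2
          ≤ n + ((∑ t ∈ T, min ((e₂.map Prod.snd).count t) (pvCap t c u2) : ℕ) : Int) := ih u2 u n hTt
        _ ≤ _ := by have := Int.ofNat_le.2 hsum_mono; omega
    · rw [List.filterMap_cons_some (by simp [pvF, hemp] : pvF c p = some (p.1, pvMatches p.2 c))]
      rw [List.foldl_cons]
      cases hfq : (pvMatches p.2 c).find?
          (fun x => !(PySem.Set.contains u2 x) && !(PySem.Set.contains u (pvEnc p.1 x))) with
      | none =>
          have hstep : pvRoundStep (u2, u, n) (p.1, pvMatches p.2 c) = (u2, u, n + 0) := by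
            simp only [pvRoundStep, pvInnerLoop_eq_find, hfq]
          rw [hstep]
          calc ((e₂.filterMap (pvF c)).foldl pvRoundStep (u2, u, n + 0)).2.2
              ≤ (n + 0) + ((∑ t ∈ T, min ((e₂.map Prod.snd).count t) (pvCap t c u2) : ℕ) : Int) :=
                ih u2 u (n + 0) hTt
            _ ≤ _ := by
                have := Int.ofNat_le.2 hsum_mono
                omega
      | some j =>
          have hstep : pvRoundStep (u2, u, n) (p.1, pvMatches p.2 c)
              = (PySem.Set.add u2 j, PySem.Set.add u (pvEnc p.1 j), n + 1) := by
            simp only [pvRoundStep, pvInnerLoop_eq_find, hfq]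
          have hjmem : j ∈ pvMatches p.2 c := List.mem_of_find?_eq_some hfq
          have hju2 : PySem.Set.contains u2 j = false := by
            have h2 := List.find?_some hfq
            rw [Bool.and_eq_true] at h2
            have h1 := h2.1
            simpa using h1
          rw [hstep]
          have hcap_other : ∀ t, t ≠ p.2 → pvCap t c (PySem.Set.add u2 j) = pvCap t c u2 := by
            intro t hne
            simp only [pvCap]
            rw [pvFilter_contains_add, pvFilterOrNotMem _ _ _
              (fun hmem => pvMatches_disjoint c hc hne hmem hjmem)]
          -- capacities at p.2 : new ≤ old - 1 and old ≥ 1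
          have hflen : ((pvMatches p.2 c).filter (fun x => PySem.Set.contains u2 x)).length + 1
              ≤ ((pvMatches p.2 c).filter
                  (fun x => PySem.Set.contains (PySem.Set.add u2 j) x)).length := by
            rw [pvFilter_contains_add]
            rw [← List.countP_eq_length_filter, ← List.countP_eq_length_filter]
            rw [pvCountP_split (fun x => PySem.Set.contains u2 x)
              (fun x => PySem.Set.contains u2 x || (x == j)) (by
                intro x hx
                have hx' : PySem.Set.contains u2 x = true := hx
                show (PySem.Set.contains u2 x || (x == j)) = true
                rw [hx']
                simp)]
            have hpos : 0 < (pvMatches p.2 c).countP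
                (fun x => (PySem.Set.contains u2 x || (x == j)) && !(PySem.Set.contains u2 x)) := by
              rw [List.countP_pos_iff]
              refine ⟨j, hjmem, ?_⟩
              show ((PySem.Set.contains u2 j || (j == j)) && !(PySem.Set.contains u2 j)) = true
              rw [hju2]
              simp
            omega
          have hflen2 : ((pvMatches p.2 c).filter
              (fun x => PySem.Set.contains (PySem.Set.add u2 j) x)).length
                ≤ (pvMatches p.2 c).length := List.length_filter_le _ _
          have hterm : 1 + min ((e₂.map Prod.snd).count p.2) (pvCap p.2 c (PySem.Set.add u2 j))
              ≤ min (((p :: e₂).map Prod.snd).count p.2) (pvCap p.2 c u2) := by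
            simp only [pvCap, List.map_cons, pvCount_cons_self]
            omega
          calc ((e₂.filterMap (pvF c)).foldl pvRoundStep
                  (PySem.Set.add u2 j, PySem.Set.add u (pvEnc p.1 j), n + 1)).2.2
              ≤ (n + 1) + ((∑ t ∈ T, min ((e₂.map Prod.snd).count t)
                  (pvCap t c (PySem.Set.add u2 j)) : ℕ) : Int) :=
                ih (PySem.Set.add u2 j) (PySem.Set.add u (pvEnc p.1 j)) (n + 1) hTt
            _ ≤ _ := by
                have hs1 : (∑ t ∈ T, min ((e₂.map Prod.snd).count t) (pvCap t c (PySem.Set.add u2 j)))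
                    = min ((e₂.map Prod.snd).count p.2) (pvCap p.2 c (PySem.Set.add u2 j))
                      + ∑ t ∈ T.erase p.2, min ((e₂.map Prod.snd).count t) (pvCap t c u2) :=
                  pvSum_split T p.2 ht0 _ _ (fun t _ hne => by simp only [hcap_other t hne])
                have hs2 : (∑ t ∈ T, min (((p :: e₂).map Prod.snd).count t) (pvCap t c u2))
                    = min (((p :: e₂).map Prod.snd).count p.2) (pvCap p.2 c u2)
                      + ∑ t ∈ T.erase p.2, min ((e₂.map Prod.snd).count t) (pvCap t c u2) :=
                  pvSum_split T p.2 ht0 _ _ (fun t _ hne => by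
                    simp only [List.map_cons, pvCount_cons_ne _ hne])
                rw [hs1, hs2]
                push_cast
                omega

-- ---- B's fold counts min(#occurrences, capacity) per body ----
lemma pvB_count (T : Finset (List Int)) :
    ∀ (ts : List (List Int)) (d : PySem.Dict (List Int) Int) (n : Int),
    (∀ t ∈ ts, t ∈ T) → (∀ t, 0 ≤ d.getD t 0) →
    (ts.foldl pvBStep (d, n)).2 = n + ((∑ t ∈ T, min (ts.count t) (d.getD t 0).toNat : ℕ) : Int) := by
  intro ts
  induction ts with
  | nil => intro d n _ _; simp
  | cons t0 ts ih =>
    intro d n hT hd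
    have ht0 : t0 ∈ T := hT t0 (by simp)
    rw [List.foldl_cons]
    by_cases hr : d.getD t0 0 ≠ 0
    · have hstep : pvBStep (d, n) t0 = (d.insert t0 (d.getD t0 0 - 1), n + 1) := by
        simp only [pvBStep]
        rw [if_pos hr]
      have hge1 : 1 ≤ d.getD t0 0 := by have := hd t0; omega
      rw [hstep, ih _ _ (fun t ht => hT t (by simp [ht])) (by
        intro t
        rw [PySem.Dict.getD_insert]
        split
        · omega
        · exact hd t)]
      have hs1 : (∑ t ∈ T, min (ts.count t) ((d.insert t0 (d.getD t0 0 - 1)).getD t 0).toNat)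
          = min (ts.count t0) ((d.insert t0 (d.getD t0 0 - 1)).getD t0 0).toNat
            + ∑ t ∈ T.erase t0, min (ts.count t) (d.getD t 0).toNat :=
        pvSum_split T t0 ht0
          (fun t => min (ts.count t) ((d.insert t0 (d.getD t0 0 - 1)).getD t 0).toNat)
          (fun t => min (ts.count t) (d.getD t 0).toNat)
          (fun t _ hne => by simp only [PySem.Dict.getD_insert]; rw [if_neg hne])
      have hs2 : (∑ t ∈ T, min ((t0 :: ts).count t) (d.getD t 0).toNat)
          = min ((t0 :: ts).count t0) (d.getD t0 0).toNat
            + ∑ t ∈ T.erase t0, min (ts.count t) (d.getD t 0).toNat :=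
        pvSum_split T t0 ht0
          (fun t => min ((t0 :: ts).count t) (d.getD t 0).toNat)
          (fun t => min (ts.count t) (d.getD t 0).toNat)
          (fun t _ hne => by simp only [pvCount_cons_ne _ hne])
      rw [hs1, hs2]
      simp only [PySem.Dict.getD_insert, pvCount_cons_self]
      push_cast
      omega
    · rw [not_not] at hr
      have hstep : pvBStep (d, n) t0 = (d, n) := by
        simp only [pvBStep]
        rw [if_neg (by simp [hr])]
      rw [hstep, ih d n (fun t ht => hT t (by simp [ht])) hd]
      congr 1
      have hs1 : (∑ t ∈ T, min (ts.count t) (d.getD t 0).toNat)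
          = min (ts.count t0) (d.getD t0 0).toNat
            + ∑ t ∈ T.erase t0, min (ts.count t) (d.getD t 0).toNat :=
        pvSum_split T t0 ht0
          (fun t => min (ts.count t) (d.getD t 0).toNat)
          (fun t => min (ts.count t) (d.getD t 0).toNat)
          (fun _ _ _ => rfl)
      have hs2 : (∑ t ∈ T, min ((t0 :: ts).count t) (d.getD t 0).toNat)
          = min ((t0 :: ts).count t0) (d.getD t0 0).toNat
            + ∑ t ∈ T.erase t0, min (ts.count t) (d.getD t 0).toNat :=
        pvSum_split T t0 ht0
          (fun t => min ((t0 :: ts).count t) (d.getD t 0).toNat)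
          (fun t => min (ts.count t) (d.getD t 0).toNat)
          (fun t _ hne => by simp only [pvCount_cons_ne _ hne])
      rw [hs1, hs2, hr]
      simp

-- ---- while-loop lemmas ----
lemma pvConvertLoop_ge (items : List (Int × List Int)) :
    ∀ (fuel : Nat) (u : PySem.Set String) (maxv : Int), maxv ≤ pvConvertLoop items fuel u maxv := by
  intro fuel
  induction fuel with
  | zero => intro u maxv; simp [pvConvertLoop]
  | succ f ih =>
      intro u maxv
      simp only [pvConvertLoop]
      split
      · split <;> omega
      · refine le_trans ?_ (ih _ _)
        split <;> omega

lemma pvConvertLoop_le (items : List (Int × List Int)) (S : Int)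
    (hb : ∀ u, (pvRound items u).2 ≤ S) :
    ∀ (fuel : Nat) (u : PySem.Set String) (maxv : Int), maxv ≤ S → pvConvertLoop items fuel u maxv ≤ S := by
  intro fuel
  induction fuel with
  | zero => intro u maxv h; simpa [pvConvertLoop] using h
  | succ f ih =>
      intro u maxv h
      simp only [pvConvertLoop]
      have := hb u
      split
      · split <;> omega
      · exact ih _ _ (by split <;> omega)

-- ===== VERDICT (by name: the statement is the Claim_ definition above) =====
theorem compare_equal_py_spec : Claim_equal_compare_equal_py := by
  intro e c _ hpre
  obtain ⟨he, hc⟩ := hpre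
  unfold Spec_compare_equal_py
  have hT : ∀ t ∈ e.map Prod.snd, t ∈ (e.map Prod.snd).toFinset := fun t ht => List.mem_toFinset.2 ht
  have hcapd : ∀ t, ((c.map Prod.snd).foldl (fun d t => d.insert t (d.getD t 0 + 1))
      PySem.Dict.empty).getD t 0 = ((c.map Prod.snd).count t : Int) := by
    intro t
    rw [PySem.Dict.getD_foldl_insert_add_one]
    simp
  -- the common value
  have hB : compare_equal_py_alt e c
      = ((∑ t ∈ (e.map Prod.snd).toFinset,
          min ((e.map Prod.snd).count t) ((c.map Prod.snd).count t) : ℕ) : Int) := by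
    unfold compare_equal_py_alt
    rw [pvB_count (e.map Prod.snd).toFinset (e.map Prod.snd) _ 0 hT
      (fun t => by rw [hcapd t]; exact Int.natCast_nonneg _)]
    simp only [hcapd, Int.toNat_natCast]
    omega
  have hfil0 : ∀ t, ∃ k, (pvMatches t c).filter (fun j => PySem.Set.contains PySem.Set.empty j)
      = (pvMatches t c).take k :=
    fun t => ⟨0, by rw [pvFilter_contains_empty, List.take_zero]⟩
  have hcap_emp : ∀ t, pvCap t c PySem.Set.empty = (c.map Prod.snd).count t := by
    intro t
    rw [pvCap_empty, pvMatches_length]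
  have hround1 : (pvRound (e.filterMap (pvF c)) PySem.Set.empty).2
      = ((∑ t ∈ (e.map Prod.snd).toFinset,
          min ((e.map Prod.snd).count t) ((c.map Prod.snd).count t) : ℕ) : Int) := by
    have hx := pvRound_exact c hc (e.map Prod.snd).toFinset e PySem.Set.empty PySem.Set.empty 0
      hT he hfil0 (fun s hs => absurd hs (List.not_mem_nil))
    simp only [pvRound]
    rw [hx]
    simp only [hcap_emp]
    omega
  have hbound : ∀ u, (pvRound (e.filterMap (pvF c)) u).2
      ≤ ((∑ t ∈ (e.map Prod.snd).toFinset,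
          min ((e.map Prod.snd).count t) ((c.map Prod.snd).count t) : ℕ) : Int) := by
    intro u
    have hx := pvRound_le c hc (e.map Prod.snd).toFinset e PySem.Set.empty u 0 hT
    simp only [pvRound]
    calc ((e.filterMap (pvF c)).foldl pvRoundStep (PySem.Set.empty, u, 0)).2.2
        ≤ 0 + ((∑ t ∈ (e.map Prod.snd).toFinset,
            min ((e.map Prod.snd).count t) (pvCap t c PySem.Set.empty) : ℕ) : Int) := hx
      _ = _ := by simp only [hcap_emp]; omega
  unfold compare_equal_py
  rw [pvBuildResult_items e c he, hB]
  set S : Int := ((∑ t ∈ (e.map Prod.snd).toFinset,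
      min ((e.map Prod.snd).count t) ((c.map Prod.snd).count t) : ℕ) : Int) with hSdef
  have hS0 : 0 ≤ S := by rw [hSdef]; exact Int.natCast_nonneg _
  simp only [pvConvertLoop]
  rw [hround1]
  by_cases hSz : S = 0
  · rw [if_pos hSz]
    rw [hSz]
    simp
  · rw [if_neg hSz]
    have hmax : (if S > 0 then S else 0) = S := by
      rw [if_pos (by omega)]
    rw [hmax]
    exact le_antisymm
      (pvConvertLoop_le _ S hbound _ _ S le_rfl)
      (pvConvertLoop_ge _ _ _ S)
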